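-- pv_equiv track=rewrite | github.com/Irox1/Othello | test.py | compter_pions
-- ===== SOURCE A (Python) =====
-- def compter_pions(position) -> tuple[int,int]:
--     """
--     Compte le nombre de pions de chaque joueur et le renvoie sous la forme d'un tuple.
--     """
--     pion_white = 0
--     pion_black = 0
--     for row in position:
--         for pion in row:
--             if pion == 1:
--                 pion_white +=1
--             elif pion == 2:
--                 pion_black +=1
--             else:
--                 pass
--     return (pion_white, pion_black)
-- ===== SOURCE B (Python) =====
-- def compter_pions(position) -> tuple[int, int]:
--     cells = [cell for row in position for cell in row]
--     return (cells.count(1), cells.count(2))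
-- ===== Notes on version B (the rewrite author's own statement) =====
-- stated objective: simpler
-- what changed: Replaces the two hand-rolled accumulators with an if/elif dispatch by flattening the grid once and reading the two answers off with list.count, eliminating per-cell branching.
import Mathlib
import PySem

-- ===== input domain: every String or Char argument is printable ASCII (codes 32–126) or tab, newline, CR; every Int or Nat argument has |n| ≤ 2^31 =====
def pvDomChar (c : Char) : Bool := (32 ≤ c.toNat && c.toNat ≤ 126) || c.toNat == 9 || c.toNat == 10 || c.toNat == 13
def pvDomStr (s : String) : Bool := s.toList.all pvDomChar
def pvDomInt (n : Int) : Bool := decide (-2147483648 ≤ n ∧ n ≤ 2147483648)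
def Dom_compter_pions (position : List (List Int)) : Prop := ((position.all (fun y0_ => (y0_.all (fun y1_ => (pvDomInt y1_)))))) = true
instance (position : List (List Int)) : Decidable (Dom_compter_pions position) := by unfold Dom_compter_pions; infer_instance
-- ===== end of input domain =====

-- B flattens the grid once and reads both answers with list.count, removing the if/elif accumulator dispatch (simpler).


-- ===== PORT A =====
def compter_pions (position : List (List Int)) : Int × Int :=
  position.foldl
    (fun (acc : Int × Int) row =>
      row.foldl
        (fun (acc' : Int × Int) pion =>
          if pion == 1 then (acc'.1 + 1, acc'.2)
          else if pion == 2 then (acc'.1, acc'.2 + 1)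
          else acc')
        acc)
    (0, 0)

-- ===== PORT B =====
def compter_pions_alt (position : List (List Int)) : Int × Int :=
  let cells := position.flatMap (fun row => row)
  ((cells.count 1 : Int), (cells.count 2 : Int))

-- ===== PRECONDITION & SPEC =====
def Spec_compter_pions (position : List (List Int)) (out : Int × Int) : Prop := out = compter_pions_alt position
instance (position : List (List Int)) (out : Int × Int) : Decidable (Spec_compter_pions position out) := by unfold Spec_compter_pions; infer_instance

-- ===== CLAIM (what is proved, stated in full; the proofs are below) =====
def Claim_equal_compter_pions : Prop := ∀ (position : List (List Int)), Dom_compter_pions position → Spec_compter_pions position (compter_pions position)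

-- ===== LEMMAS AND PROOFS =====
theorem compter_pions_row (row : List Int) (acc : Int × Int) :
    row.foldl
        (fun (acc' : Int × Int) pion =>
          if pion == 1 then (acc'.1 + 1, acc'.2)
          else if pion == 2 then (acc'.1, acc'.2 + 1)
          else acc')
        acc
      = (acc.1 + row.count 1, acc.2 + row.count 2) := by
  induction row generalizing acc with
  | nil => simp
  | cons x xs ih =>
    simp only [List.foldl_cons, ih, List.count_cons]
    by_cases h1 : x = 1
    · subst h1; simp; ring
    · by_cases h2 : x = 2
      · subst h2; simp; ring
      · simp [h1, h2]

theorem compter_pions_outer (position : List (List Int)) (acc : Int × Int) :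
    position.foldl
      (fun (acc : Int × Int) row =>
        row.foldl
          (fun (acc' : Int × Int) pion =>
            if pion == 1 then (acc'.1 + 1, acc'.2)
            else if pion == 2 then (acc'.1, acc'.2 + 1)
            else acc')
          acc)
      acc
    = (acc.1 + ((position.flatMap (fun row => row)).count 1 : Int),
       acc.2 + ((position.flatMap (fun row => row)).count 2 : Int)) := by
  induction position generalizing acc with
  | nil => simp
  | cons r rs ih =>
    rw [List.foldl_cons, compter_pions_row, ih, List.flatMap_cons, List.count_append,
      List.count_append]
    refine Prod.ext ?_ ?_ <;> (simp; ring)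

-- ===== VERDICT (by name: the statement is the Claim_ definition above) =====
theorem compter_pions_spec : Claim_equal_compter_pions := by
  intro position _
  unfold Spec_compter_pions compter_pions compter_pions_alt
  rw [compter_pions_outer]
  simp
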